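/- GENERATED by farm/mkstatement.py from design/units.tsv (unit `start_decoder.R16b`) and the assertions of Vorbis/Spec/StartDecoderR16.lean — do not edit.
   THE STATEMENT of the proof unit `start_decoder.R16b`: segment R16b of `start_decoder` (15 instructions; entries 0x116680;
   exits 0x1166c4; ranges 0x116680-0x1166bf)
   takes each of its entry assertions to one of its exit assertions (`Vorbis.Spec.StartDecoder.SegR16b`), given the contracts of its callees.
   What the names mean: Vorbis/Spec/Basic.lean (the shared hypotheses), Vorbis/Spec/StartDecoderR16.lean (the assertions). The theorem to prove:
   `theorem start_decoder_R16b_ok : Vorbis.Spec.start_decoder_R16b.Statement`. -/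
import Vorbis.Spec.Alloc
import Vorbis.Spec.StartDecoderR16
namespace Vorbis.Spec.start_decoder_R16b
open X86 X86.User Asan

/-- The statement of unit `start_decoder.R16b`. -/
def Statement : Prop :=
  ∀ (Lay : Layout) (_hLay : Lay.hi = 0x1000000) (μ : Microarch) (_hμ : UserX.MicroOK μ) (u₀ : State)
    (_hcode : HasCodeNat Lay u₀ Vorbis.L.start_decoder.entry Vorbis.Code.code_start_decoder.nat Vorbis.L.start_decoder.size)
    (_h_asan_load4_noabort : Asan.SmallCheck Lay μ Vorbis.WayInv (Vorbis.CodeOK u₀) [.rax, .rcx, .rdx] 4 Vorbis.L.__asan_load4_noabort.entry)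
    (_h_setup_malloc : ∀ (others : List Obj) (frames : List (Nat × FrameLayout)) (A : Arena), Calls Lay μ Vorbis.WayInv (Vorbis.conv u₀) Vorbis.L.setup_malloc.entry (Vorbis.Spec.setup_malloc.spec others frames A))
    (_h_asan_store8_noabort : Asan.SmallCheck Lay μ Vorbis.WayInv (Vorbis.CodeOK u₀) [.rax, .rcx, .rdx] 8 Vorbis.L.__asan_store8_noabort.entry),
    Vorbis.Spec.StartDecoder.SegR16b Lay μ u₀

end Vorbis.Spec.start_decoder_R16b
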